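-- pv_equiv track=rewrite | github.com/CoolCat467/Localization-Translation-Utility | timeutils.py | split_time
-- ===== SOURCE A (Python) =====
-- def split_time(seconds: int) -> list:
--     "Split time into decades, years, months, weeks, days, hours, minutes, and seconds."
--     seconds = int(seconds)
--     def mod_time(sec: int, num: int) -> tuple:
--         "Return number of times sec divides equally by number, then remainder."
--         smod = sec % num
--         return int((sec - smod) // num), smod
--     ##values = (1, 60, 60, 24, 7, 365/12/7, 12, 10, 10, 10, 1000, 10, 10, 5)
--     ##mults = {0:values[0]}
--     ##for i in range(len(values)):
--     ##    mults[i+1] = round(mults[i] * values[i])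
--     ##divs = list(reversed(mults.values()))[:-1]
--     divs = (15768000000000000,
--             3153600000000000,
--             315360000000000,
--             31536000000000,
--             31536000000,
--             3153600000,
--             315360000,
--             31536000,
--             2628000,
--             604800,
--             86400,
--             3600,
--             60,
--             1)
--     ret = []
--     for num in divs:
--         edivs, seconds = mod_time(seconds, num)
--         ret.append(edivs)
--     return ret
-- ===== SOURCE B (Python) =====
-- def split_time(seconds: int) -> list:
--     "Split time into decades, years, months, weeks, days, hours, minutes, and seconds."
--     seconds = int(seconds)
--     # Units from millennia-group down to months: every ratio between consecutive
--     # divisors is integral, so each component is an independent 'total // unit % ratio'.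
--     big = (15768000000000000, 3153600000000000, 315360000000000, 31536000000000,
--            31536000000, 3153600000, 315360000, 31536000, 2628000)
--     ret = [seconds // big[0]]
--     for prev, cur in zip(big, big[1:]):
--         ret.append(seconds // cur % (prev // cur))
--     # A week does not divide a month, so components below the month are computed
--     # independently from the sub-month remainder instead.
--     m = seconds % 2628000
--     small = (604800, 86400, 3600, 60, 1)
--     ret.append(m // small[0])
--     for prev, cur in zip(small, small[1:]):
--         ret.append(m // cur % (prev // cur))
--     return ret
-- ===== Notes on version B (the rewrite author's own statement) =====
-- stated objective: alternative
-- what changed: Replaces the remainder-threading loop (repeated divmod of a shrinking remainder) by computing each component independently from the original seconds via the standard 'total // unit % ratio' idiom over zipped consecutive divisors.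
import Mathlib
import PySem

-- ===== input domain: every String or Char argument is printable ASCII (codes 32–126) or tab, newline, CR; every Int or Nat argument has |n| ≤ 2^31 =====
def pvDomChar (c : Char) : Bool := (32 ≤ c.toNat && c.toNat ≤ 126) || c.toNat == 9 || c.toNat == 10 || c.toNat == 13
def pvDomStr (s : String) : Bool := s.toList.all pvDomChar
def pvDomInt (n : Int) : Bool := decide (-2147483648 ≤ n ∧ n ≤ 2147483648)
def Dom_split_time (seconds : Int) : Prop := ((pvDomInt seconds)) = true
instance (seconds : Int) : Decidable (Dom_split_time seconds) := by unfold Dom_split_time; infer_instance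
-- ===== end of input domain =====

-- B replaces A's remainder-threading loop by independent 'total // unit % ratio' components
-- (split at the month remainder, where the unit ratio is not integral): objective 'alternative'.

-- ===== PORT A =====
def mod_time (sec : Int) (num : Int) : Int × Int :=
  let smod := PySem.Int.mod sec num
  (PySem.Int.floordiv (sec - smod) num, smod)

def pvDivsA : List Int :=
  [15768000000000000, 3153600000000000, 315360000000000, 31536000000000,
   31536000000, 3153600000, 315360000, 31536000, 2628000, 604800,
   86400, 3600, 60, 1]

def split_time (seconds : Int) : List Int :=
  (pvDivsA.foldl (fun (st : List Int × Int) num =>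
      let p := mod_time st.2 num
      (st.1 ++ [p.1], p.2)) ([], seconds)).1

-- ===== PORT B =====
def pvBig : List Int :=
  [15768000000000000, 3153600000000000, 315360000000000, 31536000000000,
   31536000000, 3153600000, 315360000, 31536000, 2628000]

def pvSmall : List Int := [604800, 86400, 3600, 60, 1]

def split_time_alt (seconds : Int) : List Int :=
  let ret := [PySem.Int.floordiv seconds 15768000000000000]
  let ret := ret ++ (pvBig.zip pvBig.tail).map (fun pc =>
      PySem.Int.mod (PySem.Int.floordiv seconds pc.2) (PySem.Int.floordiv pc.1 pc.2))
  let m := PySem.Int.mod seconds 2628000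
  let ret := ret ++ [PySem.Int.floordiv m 604800]
  ret ++ (pvSmall.zip pvSmall.tail).map (fun pc =>
      PySem.Int.mod (PySem.Int.floordiv m pc.2) (PySem.Int.floordiv pc.1 pc.2))

-- ===== PRECONDITION & SPEC =====
def Spec_split_time (seconds : Int) (out : List Int) : Prop := out = split_time_alt seconds
instance (seconds : Int) (out : List Int) : Decidable (Spec_split_time seconds out) := by unfold Spec_split_time; infer_instance

-- ===== CLAIM (what is proved, stated in full; the proofs are below) =====
def Claim_equal_split_time : Prop := ∀ (seconds : Int), Dom_split_time seconds → Spec_split_time seconds (split_time seconds)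

-- ===== LEMMAS AND PROOFS =====

-- ===== VERDICT (by name: the statement is the Claim_ definition above) =====
theorem split_time_spec : Claim_equal_split_time := by
  intro s _
  show split_time s = split_time_alt s
  simp only [split_time, split_time_alt, mod_time, pvDivsA, pvBig, pvSmall,
    List.foldl, List.zip, List.tail, List.zipWith, List.map,
    List.cons_append, List.nil_append,
    PySem.Int.floordiv_eq_ediv_of_pos (by norm_num : (0:Int) < 15768000000000000),
    PySem.Int.floordiv_eq_ediv_of_pos (by norm_num : (0:Int) < 3153600000000000),
    PySem.Int.floordiv_eq_ediv_of_pos (by norm_num : (0:Int) < 315360000000000),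
    PySem.Int.floordiv_eq_ediv_of_pos (by norm_num : (0:Int) < 31536000000000),
    PySem.Int.floordiv_eq_ediv_of_pos (by norm_num : (0:Int) < 31536000000),
    PySem.Int.floordiv_eq_ediv_of_pos (by norm_num : (0:Int) < 3153600000),
    PySem.Int.floordiv_eq_ediv_of_pos (by norm_num : (0:Int) < 315360000),
    PySem.Int.floordiv_eq_ediv_of_pos (by norm_num : (0:Int) < 31536000),
    PySem.Int.floordiv_eq_ediv_of_pos (by norm_num : (0:Int) < 2628000),
    PySem.Int.floordiv_eq_ediv_of_pos (by norm_num : (0:Int) < 604800),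
    PySem.Int.floordiv_eq_ediv_of_pos (by norm_num : (0:Int) < 86400),
    PySem.Int.floordiv_eq_ediv_of_pos (by norm_num : (0:Int) < 3600),
    PySem.Int.floordiv_eq_ediv_of_pos (by norm_num : (0:Int) < 60),
    PySem.Int.floordiv_eq_ediv_of_pos (by norm_num : (0:Int) < 1),
    PySem.Int.mod_eq_emod_of_pos (by norm_num : (0:Int) < 15768000000000000),
    PySem.Int.mod_eq_emod_of_pos (by norm_num : (0:Int) < 3153600000000000),
    PySem.Int.mod_eq_emod_of_pos (by norm_num : (0:Int) < 315360000000000),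
    PySem.Int.mod_eq_emod_of_pos (by norm_num : (0:Int) < 31536000000000),
    PySem.Int.mod_eq_emod_of_pos (by norm_num : (0:Int) < 31536000000),
    PySem.Int.mod_eq_emod_of_pos (by norm_num : (0:Int) < 3153600000),
    PySem.Int.mod_eq_emod_of_pos (by norm_num : (0:Int) < 315360000),
    PySem.Int.mod_eq_emod_of_pos (by norm_num : (0:Int) < 31536000),
    PySem.Int.mod_eq_emod_of_pos (by norm_num : (0:Int) < 2628000),
    PySem.Int.mod_eq_emod_of_pos (by norm_num : (0:Int) < 604800),
    PySem.Int.mod_eq_emod_of_pos (by norm_num : (0:Int) < 86400),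
    PySem.Int.mod_eq_emod_of_pos (by norm_num : (0:Int) < 3600),
    PySem.Int.mod_eq_emod_of_pos (by norm_num : (0:Int) < 60),
    PySem.Int.mod_eq_emod_of_pos (by norm_num : (0:Int) < 1)]
  norm_num [List.cons.injEq]
  omega
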